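-- pv_equiv track=rewrite | github.com/junechem/off_to_openmm | old_scripts/Bonded/generate_openmm_xml.py | create_unique_atom_names
-- ===== SOURCE A (Python) =====
-- def create_unique_atom_names(atoms):
--     """Create unique atom names based on element with sequential numbering"""
--     atom_id_to_name = {}  # atom_id -> unique_name
--     atom_id_to_type = {}  # atom_id -> atom_type
--     element_counters = {}  # element -> count
--
--     # Sort atom IDs to ensure consistent ordering
--     for atom_id in sorted(atoms.keys()):
--         atom_type = atoms[atom_id]
--         element = atom_type[0]  # First letter is the element
--
--         # Initialize counter for this element if not seen before
--         if element not in element_counters: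
--             element_counters[element] = 0
--
--         # Create unique name
--         unique_name = f"{element}{element_counters[element]}"
--
--         # Store mappings
--         atom_id_to_name[atom_id] = unique_name
--         atom_id_to_type[atom_id] = atom_type
--
--         # Increment counter for this element
--         element_counters[element] += 1
--
--     return atom_id_to_name, atom_id_to_type
-- ===== SOURCE B (Python) =====
-- def create_unique_atom_names(atoms):
--     """Create unique atom names by grouping the sorted atom ids per element."""
--     sorted_ids = sorted(atoms)
--     groups = {}
--     for aid in sorted_ids:
--         groups.setdefault(atoms[aid][0], []).append(aid)
--     names = {}
--     for element, ids in groups.items():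
--         for i, aid in enumerate(ids):
--             names[aid] = f"{element}{i}"
--     atom_id_to_name = {aid: names[aid] for aid in sorted_ids}
--     atom_id_to_type = {aid: atoms[aid] for aid in sorted_ids}
--     return atom_id_to_name, atom_id_to_type
-- ===== Notes on version B (the rewrite author's own statement) =====
-- stated objective: alternative
-- what changed: Replaces A's single stateful loop with per-element running counters by a group-by-element pass (setdefault lists) followed by enumerate-based numbering within each group, then rebuilding both dicts in sorted-id order.
import Mathlib
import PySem

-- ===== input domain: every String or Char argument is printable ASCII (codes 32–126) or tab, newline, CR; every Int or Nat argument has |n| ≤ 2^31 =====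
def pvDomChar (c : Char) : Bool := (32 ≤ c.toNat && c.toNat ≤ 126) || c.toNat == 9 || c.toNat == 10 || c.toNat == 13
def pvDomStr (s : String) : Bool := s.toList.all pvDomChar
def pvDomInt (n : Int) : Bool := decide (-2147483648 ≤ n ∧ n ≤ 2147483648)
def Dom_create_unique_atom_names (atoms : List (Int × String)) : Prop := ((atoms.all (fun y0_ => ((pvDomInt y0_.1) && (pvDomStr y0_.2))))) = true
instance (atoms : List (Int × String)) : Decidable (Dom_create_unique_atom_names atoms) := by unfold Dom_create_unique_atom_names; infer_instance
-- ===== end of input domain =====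

-- B replaces A's stateful per-element counters by group-by-element lists numbered with enumerate; equivalence of the two decompositions is proved on all inputs whose (effective-dict) atom types are nonempty.

-- ===== PORT A =====
-- atom_type[0] is exact for nonempty strings; the empty string (Python IndexError) is excluded by Pre_.
def create_unique_atom_names (atoms : List (Int × String)) : (List (Int × String)) × (List (Int × String)) :=
  let d := PySem.Dict.ofList atoms
  let st := (PySem.List.sorted (PySem.Dict.keys d) (fun x => x) false).foldl
    (fun (st : PySem.Dict Int String × PySem.Dict Int String × PySem.Dict Char Int) aid =>
      let atom_type := PySem.Dict.getD d aid ""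
      let element := atom_type.toList.headD ' '
      let counters := if PySem.Dict.contains st.2.2 element then st.2.2 else PySem.Dict.insert st.2.2 element 0
      let unique_name := String.singleton element ++ PySem.Int.toStr (PySem.Dict.getD counters element 0)
      (PySem.Dict.insert st.1 aid unique_name, PySem.Dict.insert st.2.1 aid atom_type,
       PySem.Dict.insert counters element (PySem.Dict.getD counters element 0 + 1)))
    (PySem.Dict.empty, PySem.Dict.empty, PySem.Dict.empty)
  (st.1.items, st.2.1.items)

-- ===== PORT B =====
def create_unique_atom_names_alt (atoms : List (Int × String)) : (List (Int × String)) × (List (Int × String)) :=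
  let d := PySem.Dict.ofList atoms
  let sorted_ids := PySem.List.sorted (PySem.Dict.keys d) (fun x => x) false
  let groups := sorted_ids.foldl
    (fun g aid => PySem.Dict.modify g ((PySem.Dict.getD d aid "").toList.headD ' ') [] (fun l => l ++ [aid]))
    PySem.Dict.empty
  let names := groups.items.foldl
    (fun n p => (PySem.List.enumerate p.2 0).foldl
        (fun n q => PySem.Dict.insert n q.2 (String.singleton p.1 ++ PySem.Int.toStr q.1)) n)
    PySem.Dict.empty
  let atom_id_to_name := sorted_ids.foldl (fun m aid => PySem.Dict.insert m aid (PySem.Dict.getD names aid "")) PySem.Dict.empty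
  let atom_id_to_type := sorted_ids.foldl (fun m aid => PySem.Dict.insert m aid (PySem.Dict.getD d aid "")) PySem.Dict.empty
  (atom_id_to_name.items, atom_id_to_type.items)

-- ===== PRECONDITION & SPEC =====
-- Pre_ excludes exactly the inputs whose effective dict has an empty-string atom type: there Python A (and B) raise IndexError on atom_type[0].
def Pre_create_unique_atom_names (atoms : List (Int × String)) : Prop :=
  ∀ p ∈ (PySem.Dict.ofList atoms).items, p.2 ≠ ""
instance (atoms : List (Int × String)) : Decidable (Pre_create_unique_atom_names atoms) := by
  unfold Pre_create_unique_atom_names; infer_instance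
def pvWitness_create_unique_atom_names : (List (Int × String)) := [(2, "H1"), (1, "C"), (3, "H2")]
def Spec_create_unique_atom_names (atoms : List (Int × String)) (out : (List (Int × String)) × (List (Int × String))) : Prop := out = create_unique_atom_names_alt atoms
instance (atoms : List (Int × String)) (out : (List (Int × String)) × (List (Int × String))) : Decidable (Spec_create_unique_atom_names atoms out) := by unfold Spec_create_unique_atom_names; infer_instance

-- ===== CLAIM (what is proved, stated in full; the proofs are below) =====
def Claim_equal_create_unique_atom_names : Prop := ∀ (atoms : List (Int × String)), Dom_create_unique_atom_names atoms → Pre_create_unique_atom_names atoms → Spec_create_unique_atom_names atoms (create_unique_atom_names atoms)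

-- ===== LEMMAS AND PROOFS =====

-- element of an id, given the value function v (the effective dict lookup)
def cuanElem (v : Int → String) (k : Int) : Char := (v k).toList.headD ' '

-- A's counter dict after the conditional initialisation for id a
def cuanCnt1 (v : Int → String) (cnt : PySem.Dict Char Int) (a : Int) : PySem.Dict Char Int :=
  if PySem.Dict.contains cnt (cuanElem v a) = true then cnt else PySem.Dict.insert cnt (cuanElem v a) 0

-- the name list produced by A's loop, with the already-processed ids as `pre`
def cuanCanon (v : Int → String) : List Int → List Int → List (Int × String)
  | _, [] => []
  | pre, k :: rest =>
      (k, String.singleton (cuanElem v k) ++ PySem.Int.toStr ((pre.filter (fun x => cuanElem v x == cuanElem v k)).length : Int))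
        :: cuanCanon v (pre ++ [k]) rest

theorem cuan_foldA (v : Int → String) (d : PySem.Dict Int String)
    (hv : ∀ k, PySem.Dict.getD d k "" = v k) :
    ∀ (l : List Int) (names types : PySem.Dict Int String) (cnt : PySem.Dict Char Int) (pre : List Int),
    l.Nodup →
    (∀ k ∈ l, PySem.Dict.contains names k = false) →
    (∀ k ∈ l, PySem.Dict.contains types k = false) →
    (∀ c, PySem.Dict.getD cnt c 0 = ((pre.filter (fun x => cuanElem v x == c)).length : Int)) →
    (∀ c, PySem.Dict.contains cnt c = decide (c ∈ pre.map (cuanElem v))) →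
    (List.foldl
      (fun (st : PySem.Dict Int String × PySem.Dict Int String × PySem.Dict Char Int) aid =>
        let atom_type := PySem.Dict.getD d aid ""
        let element := atom_type.toList.headD ' '
        let counters := if PySem.Dict.contains st.2.2 element then st.2.2 else PySem.Dict.insert st.2.2 element 0
        let unique_name := String.singleton element ++ PySem.Int.toStr (PySem.Dict.getD counters element 0)
        (PySem.Dict.insert st.1 aid unique_name, PySem.Dict.insert st.2.1 aid atom_type,
         PySem.Dict.insert counters element (PySem.Dict.getD counters element 0 + 1)))
      (names, types, cnt) l).1.items
      = names.items ++ cuanCanon v pre l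
    ∧ (List.foldl
      (fun (st : PySem.Dict Int String × PySem.Dict Int String × PySem.Dict Char Int) aid =>
        let atom_type := PySem.Dict.getD d aid ""
        let element := atom_type.toList.headD ' '
        let counters := if PySem.Dict.contains st.2.2 element then st.2.2 else PySem.Dict.insert st.2.2 element 0
        let unique_name := String.singleton element ++ PySem.Int.toStr (PySem.Dict.getD counters element 0)
        (PySem.Dict.insert st.1 aid unique_name, PySem.Dict.insert st.2.1 aid atom_type,
         PySem.Dict.insert counters element (PySem.Dict.getD counters element 0 + 1)))
      (names, types, cnt) l).2.1.items
      = types.items ++ l.map (fun k => (k, v k)) := by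
  intro l
  induction l with
  | nil => intro names types cnt pre _ _ _ _ _; simp [cuanCanon]
  | cons a rest ih =>
    intro names types cnt pre hnd hn ht hc1 hc2
    obtain ⟨ha, hndr⟩ : a ∉ rest ∧ rest.Nodup := by simpa using hnd
    have hget1 : ∀ c, PySem.Dict.getD (cuanCnt1 v cnt a) c 0
        = ((pre.filter (fun x => cuanElem v x == c)).length : Int) := by
      intro c
      by_cases hc : PySem.Dict.contains cnt (cuanElem v a) = true
      · simp [cuanCnt1, hc, hc1]
      · have hcf : PySem.Dict.contains cnt (cuanElem v a) = false := by simpa using hc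
        have hnm : cuanElem v a ∉ pre.map (cuanElem v) := by
          have h2 := hc2 (cuanElem v a); rw [hcf] at h2; exact of_decide_eq_false h2.symm
        by_cases hce : c = cuanElem v a
        · have hfil : pre.filter (fun x => cuanElem v x == cuanElem v a) = [] := by
            rw [List.filter_eq_nil_iff]; intro x hx hcx
            exact hnm (List.mem_map.mpr ⟨x, hx, by simpa using hcx⟩)
          subst hce
          simp [cuanCnt1, hcf, hfil]
        · simp [cuanCnt1, hcf, PySem.Dict.getD_insert, hce, hc1]
    have hcont1 : ∀ c, PySem.Dict.contains (cuanCnt1 v cnt a) c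
        = (c == cuanElem v a || PySem.Dict.contains cnt c) := by
      intro c
      by_cases hc : PySem.Dict.contains cnt (cuanElem v a) = true
      · by_cases hce : c = cuanElem v a
        · simp [cuanCnt1, hc, hce]
        · simp [cuanCnt1, hc, hce]
      · have hcf : PySem.Dict.contains cnt (cuanElem v a) = false := by simpa using hc
        simp [cuanCnt1, hcf, PySem.Dict.contains_insert]
    have hC1' : ∀ c, PySem.Dict.getD
          (PySem.Dict.insert (cuanCnt1 v cnt a) (cuanElem v a) (PySem.Dict.getD (cuanCnt1 v cnt a) (cuanElem v a) 0 + 1)) c 0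
        = (((pre ++ [a]).filter (fun x => cuanElem v x == c)).length : Int) := by
      intro c
      by_cases hce : c = cuanElem v a
      · subst hce
        rw [List.filter_append]
        simp [hget1]
      · rw [List.filter_append]
        have hf : (cuanElem v a == c) = false := beq_false_of_ne (fun h => hce h.symm)
        simp [PySem.Dict.getD_insert, hce, hget1, hf]
    have hC2' : ∀ c, PySem.Dict.contains
          (PySem.Dict.insert (cuanCnt1 v cnt a) (cuanElem v a) (PySem.Dict.getD (cuanCnt1 v cnt a) (cuanElem v a) 0 + 1)) c
        = decide (c ∈ (pre ++ [a]).map (cuanElem v)) := by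
      intro c
      rw [PySem.Dict.contains_insert, hcont1, hc2]
      by_cases hce : c = cuanElem v a
      · simp [hce]
      · have h1 : (c == cuanElem v a) = false := beq_false_of_ne hce
        have h2 : decide (c = cuanElem v a) = false := decide_eq_false hce
        simp [h1, h2]
    have hn' : ∀ k ∈ rest, PySem.Dict.contains
        (PySem.Dict.insert names a
          (String.singleton (cuanElem v a) ++ PySem.Int.toStr (PySem.Dict.getD (cuanCnt1 v cnt a) (cuanElem v a) 0))) k = false := by
      intro k hk
      rw [PySem.Dict.contains_insert]
      have hka : (k == a) = false := beq_false_of_ne (fun h => ha (h ▸ hk))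
      simp [hka, hn k (List.mem_cons_of_mem _ hk)]
    have ht' : ∀ k ∈ rest, PySem.Dict.contains (PySem.Dict.insert types a (v a)) k = false := by
      intro k hk
      rw [PySem.Dict.contains_insert]
      have hka : (k == a) = false := beq_false_of_ne (fun h => ha (h ▸ hk))
      simp [hka, ht k (List.mem_cons_of_mem _ hk)]
    obtain ⟨ihn, iht⟩ := ih
      (PySem.Dict.insert names a
        (String.singleton (cuanElem v a) ++ PySem.Int.toStr (PySem.Dict.getD (cuanCnt1 v cnt a) (cuanElem v a) 0)))
      (PySem.Dict.insert types a (v a))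
      (PySem.Dict.insert (cuanCnt1 v cnt a) (cuanElem v a) (PySem.Dict.getD (cuanCnt1 v cnt a) (cuanElem v a) 0 + 1))
      (pre ++ [a]) hndr hn' ht' hC1' hC2'
    have hitemsN : (PySem.Dict.insert names a
        (String.singleton (cuanElem v a) ++ PySem.Int.toStr (PySem.Dict.getD (cuanCnt1 v cnt a) (cuanElem v a) 0))).items
        = names.items ++ [(a, String.singleton (cuanElem v a) ++ PySem.Int.toStr (PySem.Dict.getD (cuanCnt1 v cnt a) (cuanElem v a) 0))] :=
      PySem.Dict.items_insert_of_not_contains _ _ (hn a List.mem_cons_self)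
    have hitemsT : (PySem.Dict.insert types a (v a)).items = types.items ++ [(a, v a)] :=
      PySem.Dict.items_insert_of_not_contains _ _ (ht a List.mem_cons_self)
    constructor
    · rw [List.foldl_cons, hv a]
      refine Eq.trans ihn ?_
      rw [hitemsN, List.append_assoc, List.singleton_append]
      simp only [cuanCanon]
      rw [hget1]
    · rw [List.foldl_cons, hv a]
      refine Eq.trans iht ?_
      rw [hitemsT, List.append_assoc, List.singleton_append]
      simp only [List.map_cons]

theorem cuan_canon_eq_map (v : Int → String) :
    ∀ (l pre : List Int), (pre ++ l).Nodup →
    cuanCanon v pre l = l.map (fun k =>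
      (k, String.singleton (cuanElem v k) ++
        PySem.Int.toStr ((List.idxOf k ((pre ++ l).filter (fun x => cuanElem v x == cuanElem v k)) : Nat) : Int))) := by
  intro l
  induction l with
  | nil => intro pre _; simp [cuanCanon]
  | cons k rest ih =>
    intro pre hnd
    have hdisj : pre.Disjoint (k :: rest) := List.disjoint_of_nodup_append hnd
    have hkpre : k ∉ pre := fun hk => hdisj hk List.mem_cons_self
    have hrest : ((pre ++ [k]) ++ rest).Nodup := by
      rw [List.append_assoc, List.singleton_append]; exact hnd
    have htail := ih (pre ++ [k]) hrest
    rw [List.append_assoc, List.singleton_append] at htail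
    simp only [cuanCanon, List.map_cons, htail]
    have hpk : (cuanElem v k == cuanElem v k) = true := by simp
    have hfil : (pre ++ k :: rest).filter (fun x => cuanElem v x == cuanElem v k)
        = pre.filter (fun x => cuanElem v x == cuanElem v k)
          ++ k :: rest.filter (fun x => cuanElem v x == cuanElem v k) := by
      rw [List.filter_append, List.filter_cons, if_pos hpk]
    have hkfil : k ∉ pre.filter (fun x => cuanElem v x == cuanElem v k) :=
      fun hk => hkpre (List.mem_of_mem_filter hk)
    have hidx : List.idxOf k ((pre ++ k :: rest).filter (fun x => cuanElem v x == cuanElem v k))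
        = (pre.filter (fun x => cuanElem v x == cuanElem v k)).length := by
      rw [hfil, List.idxOf_append_of_notMem hkfil, List.idxOf_cons_self]
      omega
    rw [hidx]

-- the names dict built by B from the element groups
def cuanNames (v : Int → String) (ks : List Int) : PySem.Dict Int String :=
  ((ks.foldl (fun g aid => PySem.Dict.modify g (cuanElem v aid) [] (fun l => l ++ [aid])) PySem.Dict.empty).items).foldl
    (fun n p => (PySem.List.enumerate p.2 0).foldl
        (fun n q => PySem.Dict.insert n q.2 (String.singleton p.1 ++ PySem.Int.toStr q.1)) n)
    PySem.Dict.empty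

theorem cuan_foldl_flatMap {α β γ : Type} (g : α → List β) (f : γ → β → γ) :
    ∀ (l : List α) (init : γ), (l.flatMap g).foldl f init = l.foldl (fun acc x => (g x).foldl f acc) init := by
  intro l
  induction l with
  | nil => intro init; rfl
  | cons a t ih => intro init; rw [List.flatMap_cons, List.foldl_append, List.foldl_cons, ih]

theorem cuan_names (v : Int → String) (ks : List Int) (hks : ks.Nodup) (k : Int) (hk : k ∈ ks) :
    PySem.Dict.getD (cuanNames v ks) k ""
    = String.singleton (cuanElem v k) ++
        PySem.Int.toStr ((List.idxOf k (ks.filter (fun x => cuanElem v x == cuanElem v k)) : Nat) : Int) := by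
  have hGget : ∀ c, PySem.Dict.getD
      (ks.foldl (fun g aid => PySem.Dict.modify g (cuanElem v aid) [] (fun l => l ++ [aid])) PySem.Dict.empty) c []
      = ks.filter (fun x => cuanElem v x == c) := by
    intro c
    have h1 : ks.foldl (fun g aid => PySem.Dict.modify g (cuanElem v aid) [] (fun l => l ++ [aid])) PySem.Dict.empty
        = (ks.map (fun x => (cuanElem v x, x))).foldl
            (fun g p => PySem.Dict.modify g p.1 [] (fun l => l ++ [p.2])) PySem.Dict.empty := by
      rw [List.foldl_map]
    rw [h1, PySem.Dict.getD_foldl_modify_append]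
    simp [List.filter_map, Function.comp_def]
  have hGkeysnd : (ks.foldl (fun g aid => PySem.Dict.modify g (cuanElem v aid) [] (fun l => l ++ [aid])) PySem.Dict.empty).keys.Nodup := by
    rw [PySem.Dict.keys_foldl_modify_key ks (cuanElem v) [] (fun _ x => fun l => l ++ [x])]
    simp only [PySem.Dict.keys_empty, PySem.Set.update_nil_left]
    exact PySem.Set.nodup_ofList _
  have hGitems : ∀ p ∈ (ks.foldl (fun g aid => PySem.Dict.modify g (cuanElem v aid) [] (fun l => l ++ [aid])) PySem.Dict.empty).items,
      p.2 = ks.filter (fun x => cuanElem v x == p.1) := by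
    intro p hp
    have h := PySem.Dict.getD_of_mem_items _ (show (p.1, p.2) ∈ _ by simpa using hp) hGkeysnd []
    rw [hGget] at h; exact h.symm
  have hNeq : cuanNames v ks
      = ((ks.foldl (fun g aid => PySem.Dict.modify g (cuanElem v aid) [] (fun l => l ++ [aid])) PySem.Dict.empty).items.flatMap
          (fun p => (PySem.List.enumerate p.2 0).map (fun q => (q.2, String.singleton p.1 ++ PySem.Int.toStr q.1)))).foldl
          (fun n r => PySem.Dict.insert n r.1 r.2) PySem.Dict.empty := by
    rw [cuan_foldl_flatMap]
    unfold cuanNames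
    congr 1
    funext n p
    rw [List.foldl_map]
  set G := ks.foldl (fun g aid => PySem.Dict.modify g (cuanElem v aid) [] (fun l => l ++ [aid])) PySem.Dict.empty with hGdef
  set bigL := G.items.flatMap
      (fun p => (PySem.List.enumerate p.2 0).map (fun q => (q.2, String.singleton p.1 ++ PySem.Int.toStr q.1))) with hbigL
  have hfst : bigL.map Prod.fst = G.items.flatMap (fun p => p.2) := by
    rw [hbigL, List.map_flatMap]
    congr 1
    funext p
    simp [List.map_map, Function.comp_def, PySem.List.map_snd_enumerate]
  have hprne : G.items.Pairwise (fun p q => p.1 ≠ q.1) := by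
    have h := hGkeysnd
    simp only [PySem.Dict.keys] at h
    rw [List.Nodup, List.pairwise_map] at h
    exact h
  have hfstnd : (bigL.map Prod.fst).Nodup := by
    rw [hfst, List.flatMap_def, List.nodup_flatten]
    constructor
    · intro l hl
      obtain ⟨p, hp, rfl⟩ := List.mem_map.mp hl
      rw [hGitems p hp]
      exact hks.filter _
    · rw [List.pairwise_map]
      refine (List.Pairwise.and_mem.mp hprne).imp ?_
      rintro p q ⟨hp, hq, hne⟩ x hxp hxq
      rw [hGitems p hp, List.mem_filter] at hxp
      rw [hGitems q hq, List.mem_filter] at hxq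
      exact hne (by rw [← eq_of_beq hxp.2, ← eq_of_beq hxq.2])
  have hNitems : (cuanNames v ks).items = bigL := by
    rw [hNeq]
    have h := PySem.Dict.items_foldl_insert_fresh bigL Prod.fst Prod.snd PySem.Dict.empty
      (fun a _ => PySem.Dict.contains_empty _) hfstnd
    simpa using h
  have hNkeys : (cuanNames v ks).keys.Nodup := by
    simp only [PySem.Dict.keys]
    rw [hNitems]
    simpa using hfstnd
  have hkfil : k ∈ ks.filter (fun x => cuanElem v x == cuanElem v k) :=
    List.mem_filter.mpr ⟨hk, by simp⟩
  have hidxlt : (ks.filter (fun x => cuanElem v x == cuanElem v k)).idxOf k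
      < (ks.filter (fun x => cuanElem v x == cuanElem v k)).length :=
    List.idxOf_lt_length_of_mem hkfil
  have henum : (((((ks.filter (fun x => cuanElem v x == cuanElem v k)).idxOf k : Nat)) : Int), k)
      ∈ PySem.List.enumerate (ks.filter (fun x => cuanElem v x == cuanElem v k)) 0 := by
    rw [PySem.List.mem_enumerate_iff]
    exact ⟨_, hidxlt, by rw [List.getElem_idxOf hidxlt]; simp⟩
  have hGmem : (cuanElem v k, ks.filter (fun x => cuanElem v x == cuanElem v k)) ∈ G.items := by
    have hmemkeys : cuanElem v k ∈ G.keys := by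
      rw [hGdef, PySem.Dict.keys_foldl_modify_key ks (cuanElem v) [] (fun _ x => fun l => l ++ [x])]
      simp only [PySem.Dict.keys_empty, PySem.Set.update_nil_left]
      exact (PySem.Set.mem_ofList _ _).mpr (List.mem_map_of_mem hk)
    obtain ⟨w, hw⟩ : ∃ w, G.get? (cuanElem v k) = some w := by
      cases hopt : G.get? (cuanElem v k) with
      | none => exact absurd ((PySem.Dict.get?_eq_none_iff_not_mem_keys _ _).mp hopt) (not_not_intro hmemkeys)
      | some w => exact ⟨w, rfl⟩
    have hw2 : G.getD (cuanElem v k) [] = w := PySem.Dict.getD_of_get?_eq_some _ _ hw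
    rw [hGget] at hw2
    rw [← hw2] at hw
    exact PySem.Dict.mem_items_of_get?_eq_some _ hw
  have hmemBig : (k, String.singleton (cuanElem v k) ++
      PySem.Int.toStr (((ks.filter (fun x => cuanElem v x == cuanElem v k)).idxOf k : Nat) : Int)) ∈ bigL := by
    rw [hbigL]
    exact List.mem_flatMap.mpr ⟨_, hGmem, List.mem_map.mpr ⟨_, henum, rfl⟩⟩
  exact PySem.Dict.getD_of_mem_items _ (hNitems ▸ hmemBig) hNkeys ""

-- ===== VERDICT (by name: the statement is the Claim_ definition above) =====
theorem create_unique_atom_names_spec : Claim_equal_create_unique_atom_names := by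
  intro atoms _ _
  unfold Spec_create_unique_atom_names
  set v : Int → String := fun k => PySem.Dict.getD (PySem.Dict.ofList atoms) k "" with hvdef
  set ks := PySem.List.sorted (PySem.Dict.keys (PySem.Dict.ofList atoms)) (fun x => x) false with hksdef
  have hks : ks.Nodup :=
    (PySem.List.sorted_perm _ _ _).nodup_iff.mpr (PySem.Dict.nodup_keys_ofList _)
  obtain ⟨hA1, hA2⟩ := cuan_foldA v (PySem.Dict.ofList atoms) (fun _ => rfl) ks
    PySem.Dict.empty PySem.Dict.empty PySem.Dict.empty [] hks
    (fun _ _ => by simp) (fun _ _ => by simp) (fun c => by simp) (fun c => by simp)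
  have hBn := PySem.Dict.items_foldl_insert_fresh ks (fun a => a)
    (fun a => PySem.Dict.getD (cuanNames v ks) a "") PySem.Dict.empty
    (fun a _ => by simp) (by simpa using hks)
  have hBt := PySem.Dict.items_foldl_insert_fresh ks (fun a => a)
    (fun a => v a) PySem.Dict.empty (fun a _ => by simp) (by simpa using hks)
  have lhs1 : (create_unique_atom_names atoms).1 = cuanCanon v [] ks := by
    have h := hA1
    rw [show (PySem.Dict.empty : PySem.Dict Int String).items = [] from rfl, List.nil_append] at h
    exact h
  have lhs2 : (create_unique_atom_names atoms).2 = ks.map (fun k => (k, v k)) := by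
    have h := hA2
    rw [show (PySem.Dict.empty : PySem.Dict Int String).items = [] from rfl, List.nil_append] at h
    exact h
  have rhs1 : (create_unique_atom_names_alt atoms).1
      = ks.map (fun a => (a, PySem.Dict.getD (cuanNames v ks) a "")) := by
    have h := hBn
    rw [show (PySem.Dict.empty : PySem.Dict Int String).items = [] from rfl, List.nil_append] at h
    exact h
  have rhs2 : (create_unique_atom_names_alt atoms).2 = ks.map (fun a => (a, v a)) := by
    have h := hBt
    rw [show (PySem.Dict.empty : PySem.Dict Int String).items = [] from rfl, List.nil_append] at h
    exact h
  refine Prod.ext ?_ ?_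
  · rw [lhs1, rhs1, cuan_canon_eq_map v ks [] (by simpa using hks)]
    simp only [List.nil_append]
    exact List.map_congr_left (fun a ha => by rw [cuan_names v ks hks a ha])
  · rw [lhs2, rhs2]
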